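-- pv_equiv track=rewrite | github.com/sevimcaliskann/is_fid_score | fid_score.py | create_emo_lists
-- ===== SOURCE A (Python) =====
-- def create_emo_lists(emos):
--     max_emo = max(emos.values())
--     min_emo = min(emos.values())
--     emos_ = dict()
--     for i in range(min_emo, max_emo+1):
--         ids = [id for id in emos.keys() if emos[id]==i]
--         if len(ids)>0:
--             emos_[i] = ids
--
--     return emos_
-- ===== SOURCE B (Python) =====
-- def create_emo_lists(emos):
--     buckets = {}
--     for id, v in emos.items():
--         buckets.setdefault(v, []).append(id)
--     return {k: buckets[k] for k in sorted(buckets)}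
-- ===== Notes on version B (the rewrite author's own statement) =====
-- stated objective: faster
-- what changed: Instead of scanning the whole dict once for every integer in range(min,max+1), B buckets ids by value in a single pass over the items and then emits the buckets for the sorted distinct values.
import Mathlib
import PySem

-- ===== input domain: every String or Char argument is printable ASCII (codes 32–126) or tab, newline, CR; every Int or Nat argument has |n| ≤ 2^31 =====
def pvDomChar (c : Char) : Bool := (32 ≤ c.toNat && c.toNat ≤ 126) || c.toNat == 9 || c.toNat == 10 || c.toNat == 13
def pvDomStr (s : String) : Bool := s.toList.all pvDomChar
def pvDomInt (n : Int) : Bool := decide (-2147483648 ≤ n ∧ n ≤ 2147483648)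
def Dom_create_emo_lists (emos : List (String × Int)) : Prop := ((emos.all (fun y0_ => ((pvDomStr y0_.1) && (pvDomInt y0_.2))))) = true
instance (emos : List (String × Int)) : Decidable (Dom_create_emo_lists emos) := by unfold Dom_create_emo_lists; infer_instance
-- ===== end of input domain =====

-- B replaces A's scan of the whole dict for every value in range(min,max+1) by one bucketing pass plus a sort of the distinct values.
-- The input dict is the association list `emos` (unique keys, insertion order); A mutates nothing.

-- ===== PORT A =====
def create_emo_lists (emos : List (String × Int)) : List (Int × List String) :=
  let d : PySem.Dict String Int := PySem.Dict.mk emos   -- the parameter IS the dict `emos`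
  match PySem.List.max? d.values (fun v => v), PySem.List.min? d.values (fun v => v) with
  | some max_emo, some min_emo =>
      -- for i in range(min_emo, max_emo+1): ids = [id for id in emos.keys() if emos[id]==i]; if len(ids)>0: emos_[i] = ids
      ((PySem.List.pyRange min_emo (max_emo + 1) 1).foldl (fun emos_ i =>
        let ids := d.keys.filter (fun id => d.get? id == some i)
        if ids.length > 0 then emos_.insert i ids else emos_) (PySem.Dict.empty : PySem.Dict Int (List String))).items
  | _, _ => []   -- unreachable under Pre_: max()/min() raise ValueError on an empty dict

-- ===== PORT B =====
def create_emo_lists_alt (emos : List (String × Int)) : List (Int × List String) :=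
  -- buckets.setdefault(v, []).append(id)  ==  buckets[v] = buckets.get(v, []) + [id]  ==  Dict.modify
  let buckets : PySem.Dict Int (List String) :=
    emos.foldl (fun d p => d.modify p.2 [] (fun l => l ++ [p.1])) PySem.Dict.empty
  -- {k: buckets[k] for k in sorted(buckets)}  (k is a key of buckets, so buckets[k] never raises)
  (PySem.List.sorted buckets.keys (fun k => k)).map (fun k => (k, buckets.getD k []))

-- ===== PRECONDITION & SPEC =====
-- Nonempty because max()/min() raise ValueError on an empty dict; nodup keys because a Python
-- dict cannot contain duplicate keys, so lists with duplicate keys represent no input of A.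
def Pre_create_emo_lists (emos : List (String × Int)) : Prop :=
  emos ≠ [] ∧ (emos.map Prod.fst).Nodup
instance (emos : List (String × Int)) : Decidable (Pre_create_emo_lists emos) := by unfold Pre_create_emo_lists; infer_instance
def pvWitness_create_emo_lists : (List (String × Int)) := [("a", 1), ("b", 3), ("c", 1)]

def Spec_create_emo_lists (emos : List (String × Int)) (out : List (Int × List String)) : Prop := out = create_emo_lists_alt emos
instance (emos : List (String × Int)) (out : List (Int × List String)) : Decidable (Spec_create_emo_lists emos out) := by unfold Spec_create_emo_lists; infer_instance

-- ===== CLAIM (what is proved, stated in full; the proofs are below) =====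
def Claim_equal_create_emo_lists : Prop := ∀ (emos : List (String × Int)), Dom_create_emo_lists emos → Pre_create_emo_lists emos → Spec_create_emo_lists emos (create_emo_lists emos)

-- ===== LEMMAS AND PROOFS =====

-- A's inner comprehension: with unique keys, filtering the keys by lookup = i is
-- filtering the pairs by value = i and projecting to keys.
theorem pv_ids_eq (emos : List (String × Int)) (h : (emos.map Prod.fst).Nodup) (i : Int) :
    (PySem.Dict.mk emos).keys.filter (fun id => (PySem.Dict.mk emos).get? id == some i)
      = (emos.filter (fun p => p.2 == i)).map (fun p => p.1) := by
  induction emos with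
  | nil => simp [PySem.Dict.keys]
  | cons hd tl ih =>
    obtain ⟨k, v⟩ := hd
    simp only [List.map_cons, List.nodup_cons] at h
    obtain ⟨hk, htl⟩ := h
    have hkeys : (PySem.Dict.mk ((k, v) :: tl)).keys = k :: (PySem.Dict.mk tl).keys := by
      simp [PySem.Dict.keys]
    have hfilter : (PySem.Dict.mk tl).keys.filter
          (fun id => (PySem.Dict.mk ((k, v) :: tl)).get? id == some i)
        = (PySem.Dict.mk tl).keys.filter (fun id => (PySem.Dict.mk tl).get? id == some i) := by
      apply List.filter_congr
      intro id hid
      have hne : (k == id) = false := by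
        simp only [beq_eq_false_iff_ne]
        intro e
        exact hk (by simpa [PySem.Dict.keys, ← e] using hid)
      rw [PySem.Dict.get?_mk_cons, hne]
      simp
    rw [hkeys, List.filter_cons, hfilter, ih htl]
    rw [PySem.Dict.get?_mk_cons]
    simp only [BEq.rfl, if_true, List.filter_cons]
    by_cases hv : v = i
    · simp [hv]
    · simp [(by simpa using hv : (v == i) = false)]

-- B's buckets: the bucket at i collects exactly the keys whose value is i.
theorem pv_bucket_eq (emos : List (String × Int)) (i : Int) :
    (emos.foldl (fun d p => d.modify p.2 [] (fun l => l ++ [p.1])) (PySem.Dict.empty : PySem.Dict Int (List String))).getD i []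
      = (emos.filter (fun p => p.2 == i)).map (fun p => p.1) := by
  have h1 : List.foldl (fun (d : PySem.Dict Int (List String)) q => d.modify q.1 [] (fun l => l ++ [q.2]))
        PySem.Dict.empty (emos.map Prod.swap)
      = List.foldl (fun d p => d.modify p.2 [] (fun l => l ++ [p.1])) PySem.Dict.empty emos := by
    rw [List.foldl_map]
    rfl
  rw [← h1, PySem.Dict.getD_foldl_modify_append]
  simp [List.filter_map, List.map_map, Function.comp_def]

theorem pv_bucket_keys (emos : List (String × Int)) :
    (emos.foldl (fun d p => d.modify p.2 [] (fun l => l ++ [p.1])) (PySem.Dict.empty : PySem.Dict Int (List String))).keys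
      = PySem.Set.ofList (emos.map (fun p => p.2)) := by
  have h := PySem.Dict.keys_foldl_modify_key emos (fun p => p.2) ([] : List String)
    (fun _ p l => l ++ [p.1]) (PySem.Dict.empty)
  rw [h]
  rfl

-- A's conditional-insert loop over fresh distinct keys appends its pairs in order.
theorem pv_items_fold_insert_if (p : Int → Prop) [DecidablePred p] (f : Int → List String) (l : List Int)
    (acc : PySem.Dict Int (List String)) (hn : l.Nodup)
    (h : ∀ i ∈ l, acc.contains i = false) :
    (l.foldl (fun d i => if p i then d.insert i (f i) else d) acc).items
      = acc.items ++ (l.filter (fun i => decide (p i))).map (fun i => (i, f i)) := by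
  induction l generalizing acc with
  | nil => simp
  | cons i t ih =>
    simp only [List.nodup_cons] at hn
    obtain ⟨hit, htn⟩ := hn
    simp only [List.foldl_cons, List.filter_cons]
    by_cases hp : p i
    · have hc : acc.contains i = false := h i (List.mem_cons_self ..)
      have h' : ∀ j ∈ t, (acc.insert i (f i)).contains j = false := by
        intro j hj
        rw [PySem.Dict.contains_insert]
        have : (j == i) = false := by
          simp only [beq_eq_false_iff_ne]
          intro e; exact hit (e ▸ hj)
        simp [this, h j (List.mem_cons_of_mem _ hj)]
      rw [if_pos hp, ih _ htn h', PySem.Dict.items_insert_of_not_contains _ _ hc]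
      simp [hp]
    · rw [if_neg hp, ih _ htn (fun j hj => h j (List.mem_cons_of_mem _ hj))]
      simp [hp]

-- The range filtered to the present values IS the ascending list of distinct values.
theorem pv_range_filter (emos : List (String × Int))
    (minE maxE : Int)
    (hmin : PySem.List.min? (emos.map Prod.snd) (fun v => v) = some minE)
    (hmax : PySem.List.max? (emos.map Prod.snd) (fun v => v) = some maxE) :
    PySem.List.sorted (PySem.Set.ofList (emos.map (fun p => p.2))) (fun k => k)
      = (PySem.List.pyRange minE (maxE + 1) 1).filter
          (fun i => decide (0 < ((emos.filter (fun p => p.2 == i)).map (fun p => p.1)).length)) := by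
  apply PySem.List.sorted_eq_of_perm_of_pairwise_lt
  · rw [List.perm_ext_iff_of_nodup (List.Nodup.filter _ (PySem.List.nodup_pyRange_one _ _))
      (PySem.Set.nodup_ofList _)]
    intro i
    rw [PySem.Set.mem_ofList, List.mem_filter, PySem.List.mem_pyRange_one]
    constructor
    · rintro ⟨-, hc⟩
      have hlen : 0 < ((emos.filter (fun p => p.2 == i)).map (fun p => p.1)).length := by
        simpa using hc
      rw [List.length_map, List.length_pos_iff] at hlen
      obtain ⟨q, hq⟩ := List.exists_mem_of_ne_nil _ hlen
      have hm := List.mem_filter.mp hq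
      exact List.mem_map.mpr ⟨q, hm.1, by simpa using hm.2⟩
    · intro hi
      obtain ⟨q, hq, hqi⟩ := List.mem_map.mp hi
      refine ⟨⟨?_, ?_⟩, ?_⟩
      · exact PySem.List.min?_isMin hmin i hi
      · have := PySem.List.max?_isMax hmax i hi
        omega
      · have hqf : q ∈ emos.filter (fun p => p.2 == i) :=
          List.mem_filter.mpr ⟨hq, by simpa using hqi⟩
        simp only [decide_eq_true_eq, List.length_map, List.length_pos_iff]
        exact List.ne_nil_of_mem hqf
  · exact List.Pairwise.filter _ (PySem.List.pairwise_lt_pyRange_one _ _)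

-- ===== VERDICT (by name: the statement is the Claim_ definition above) =====
theorem create_emo_lists_spec : Claim_equal_create_emo_lists := by
  intro emos _ hpre
  obtain ⟨hne, hnd⟩ := hpre
  unfold Spec_create_emo_lists create_emo_lists create_emo_lists_alt
  have hvals : (PySem.Dict.mk emos).values = emos.map Prod.snd := by
    simp [PySem.Dict.values]
  have hvne : emos.map Prod.snd ≠ [] := by simpa using hne
  rcases hmax : PySem.List.max? (emos.map Prod.snd) (fun v => v) with _ | maxE
  · exact absurd ((PySem.List.max?_eq_none_iff _ _).mp hmax) hvne
  rcases hmin : PySem.List.min? (emos.map Prod.snd) (fun v => v) with _ | minE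
  · exact absurd ((PySem.List.min?_eq_none_iff _ _).mp hmin) hvne
  simp only [hvals, hmax, hmin]
  have hfun : (fun (emos_ : PySem.Dict Int (List String)) (i : Int) =>
        let ids := (PySem.Dict.mk emos).keys.filter (fun id => (PySem.Dict.mk emos).get? id == some i)
        if ids.length > 0 then emos_.insert i ids else emos_)
      = (fun (emos_ : PySem.Dict Int (List String)) (i : Int) =>
        if 0 < ((emos.filter (fun p => p.2 == i)).map (fun p => p.1)).length
        then emos_.insert i ((emos.filter (fun p => p.2 == i)).map (fun p => p.1)) else emos_) := by
    funext a i
    simp only [pv_ids_eq emos hnd i, gt_iff_lt]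
  rw [hfun, pv_items_fold_insert_if _ _ _ _ (PySem.List.nodup_pyRange_one _ _)
      (fun i _ => PySem.Dict.contains_empty i)]
  rw [pv_bucket_keys, pv_range_filter emos minE maxE hmin hmax]
  simp only [show (PySem.Dict.empty : PySem.Dict Int (List String)).items = [] from rfl,
    List.nil_append]
  apply List.map_congr_left
  intro k hk
  rw [pv_bucket_eq emos k]
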